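-- pv_equiv track=rewrite | github.com/mhammadgammal/DSP_Tasks | plot_signal.py | convolve_signals
-- ===== SOURCE A (Python) =====
-- def convolve_signals(indexes_1, signal_1, indexes_2, signal_2):
--     # Lengths of the input signals
--     len_signal_1 = len(signal_1)
--     len_signal_2 = len(signal_2)
--
--     # Length of the output signal
--     len_output_signal = len_signal_1 + len_signal_2 - 1
--
--     # Initialize the output signal
--     output_signal = [0] * len_output_signal
--
--     # Perform convolution
--     for n in range(len_output_signal):
--         for k in range(max(0, n - len_signal_2 + 1), min(len_signal_1, n + 1)):
--             output_signal[n] += signal_1[k] * signal_2[n - k]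
--
--     # Combine the indexes for the output signal
--     output_indexes = indexes_1 + indexes_2
--     x = list(set(output_indexes))
--     x.sort()
--     return x, output_signal
-- ===== SOURCE B (Python) =====
-- def convolve_signals(indexes_1, signal_1, indexes_2, signal_2):
--     # Horner-style shift-and-add polynomial multiplication: fold signal_1 from the
--     # right; each step shifts the partial product by one and adds a scaled copy of
--     # signal_2.  No output buffer and no index arithmetic over output slots.
--     def add(x, y):
--         if len(x) < len(y):
--             x, y = y, x
--         return [x[i] + (y[i] if i < len(y) else 0) for i in range(len(x))]
--
--     output_signal = []
--     if signal_1 and signal_2: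
--         for a in reversed(signal_1):
--             output_signal = add([a * v for v in signal_2], [0] + output_signal)
--     return sorted(set(indexes_1 + indexes_2)), output_signal
-- ===== Notes on version B (the rewrite author's own statement) =====
-- stated objective: alternative
-- what changed: Replaces A's output-buffer double loop (gather per output index with min/max bounds) by Horner-style shift-and-add polynomial multiplication: fold signal_1 from the right, each step adding a scaled copy of signal_2 to the one-slot-shifted partial product; no output buffer or output-index arithmetic remains.
-- intended difference: When exactly one signal is empty and the other has length >= 2, A returns a buffer of len-1 zeros (an artefact of the [0]*(len1+len2-1) formula) while B returns the empty signal, which is the intended convolution with an empty signal. — e.g. on convolve_signals([], [], [], [1, 2]): A returns ([], [0]), B returns ([], [])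
import Mathlib
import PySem

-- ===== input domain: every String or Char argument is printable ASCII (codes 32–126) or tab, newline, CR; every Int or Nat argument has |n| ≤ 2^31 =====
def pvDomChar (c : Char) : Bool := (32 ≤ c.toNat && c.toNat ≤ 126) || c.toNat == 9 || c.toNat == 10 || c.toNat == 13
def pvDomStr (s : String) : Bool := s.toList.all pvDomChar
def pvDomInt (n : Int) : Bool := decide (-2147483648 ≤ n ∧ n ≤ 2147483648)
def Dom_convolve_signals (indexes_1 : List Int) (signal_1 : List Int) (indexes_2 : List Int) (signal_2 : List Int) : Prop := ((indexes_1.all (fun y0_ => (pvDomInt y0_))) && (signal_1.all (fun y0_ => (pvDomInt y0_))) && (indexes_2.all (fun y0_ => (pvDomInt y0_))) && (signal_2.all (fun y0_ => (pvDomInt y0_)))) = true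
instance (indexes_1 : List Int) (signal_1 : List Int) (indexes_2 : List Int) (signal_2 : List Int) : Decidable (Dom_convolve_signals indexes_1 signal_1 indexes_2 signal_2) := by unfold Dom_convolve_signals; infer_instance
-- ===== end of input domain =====

-- B replaces A's output-buffer gather loop by Horner-style shift-and-add polynomial
-- multiplication (objective: alternative). When exactly one signal is empty and the
-- other has length ≥ 2, A returns a len-1 zero buffer and B the empty signal (D_ below).

-- ===== PORT A =====
-- Indices are kept as Nat: every index A forms is nonnegative and in range, Python's
-- max(0, n - len_signal_2 + 1) is exactly Nat truncated subtraction n + 1 - len_signal_2,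
-- and [0] * (len1 + len2 - 1) / range(len1 + len2 - 1) agree with the Nat truncation of
-- len1 + len2 - 1 (both give the empty list when the Python value is -1).
def convolve_signals (indexes_1 : List Int) (signal_1 : List Int) (indexes_2 : List Int) (signal_2 : List Int) : List Int × List Int :=
  let len_signal_1 := signal_1.length
  let len_signal_2 := signal_2.length
  let len_output_signal := len_signal_1 + len_signal_2 - 1
  let output_signal : List Int := List.replicate len_output_signal 0
  let output_signal :=
    (List.range len_output_signal).foldl (fun out n =>
      (List.range' (n + 1 - len_signal_2) (min len_signal_1 (n + 1) - (n + 1 - len_signal_2))).foldl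
        (fun out k => out.set n (out.getD n 0 + signal_1.getD k 0 * signal_2.getD (n - k) 0)) out)
      output_signal
  let output_indexes := indexes_1 ++ indexes_2
  let x := PySem.Set.ofList output_indexes
  let x := PySem.List.sorted x (fun v => v) false
  (x, output_signal)

-- ===== PORT B =====
-- helper `add` of Source B: elementwise sum, shorter list padded with zeros
def convAdd (x y : List Int) : List Int :=
  if x.length < y.length then
    (List.range y.length).map (fun i => y.getD i 0 + if i < x.length then x.getD i 0 else 0)
  else
    (List.range x.length).map (fun i => x.getD i 0 + if i < y.length then y.getD i 0 else 0)

def convolve_signals_alt (indexes_1 : List Int) (signal_1 : List Int) (indexes_2 : List Int) (signal_2 : List Int) : List Int × List Int :=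
  let output_signal : List Int := []
  let output_signal :=
    if signal_1 ≠ [] ∧ signal_2 ≠ [] then
      signal_1.reverse.foldl (fun r a => convAdd (signal_2.map (fun v => a * v)) (0 :: r)) output_signal
    else output_signal
  (PySem.List.sorted (PySem.Set.ofList (indexes_1 ++ indexes_2)) (fun v => v) false, output_signal)

-- ===== PRECONDITION & SPEC =====
-- When exactly one signal is empty and the other has length ≥ 2, A returns a buffer of
-- len-1 zeros (an artefact of the [0]*(len1+len2-1) formula) while B returns the empty
-- signal, which is the intended convolution with an empty signal.
def D_convolve_signals (indexes_1 : List Int) (signal_1 : List Int) (indexes_2 : List Int) (signal_2 : List Int) : Prop :=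
  (signal_1 = [] ∧ 2 ≤ signal_2.length) ∨ (signal_2 = [] ∧ 2 ≤ signal_1.length)
instance (indexes_1 : List Int) (signal_1 : List Int) (indexes_2 : List Int) (signal_2 : List Int) : Decidable (D_convolve_signals indexes_1 signal_1 indexes_2 signal_2) := by unfold D_convolve_signals; infer_instance

def Spec_convolve_signals (indexes_1 : List Int) (signal_1 : List Int) (indexes_2 : List Int) (signal_2 : List Int) (out : List Int × List Int) : Prop := ¬ D_convolve_signals indexes_1 signal_1 indexes_2 signal_2 → out = convolve_signals_alt indexes_1 signal_1 indexes_2 signal_2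
instance (indexes_1 : List Int) (signal_1 : List Int) (indexes_2 : List Int) (signal_2 : List Int) (out : List Int × List Int) : Decidable (Spec_convolve_signals indexes_1 signal_1 indexes_2 signal_2 out) := by unfold Spec_convolve_signals; infer_instance

def pvDiffWitness_convolve_signals : List Int × List Int × List Int × List Int := ([], [], [], [1, 2])
def pvDiffWitnessOut_convolve_signals : (List Int × List Int) × (List Int × List Int) := (([], [0]), ([], []))

-- ===== CLAIM (what is proved, stated in full; the proofs are below) =====
def Claim_unchanged_convolve_signals : Prop := ∀ (indexes_1 : List Int) (signal_1 : List Int) (indexes_2 : List Int) (signal_2 : List Int), Dom_convolve_signals indexes_1 signal_1 indexes_2 signal_2 → Spec_convolve_signals indexes_1 signal_1 indexes_2 signal_2 (convolve_signals indexes_1 signal_1 indexes_2 signal_2)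
def Claim_changed_convolve_signals : Prop := Dom_convolve_signals (pvDiffWitness_convolve_signals.1) (pvDiffWitness_convolve_signals.2.1) (pvDiffWitness_convolve_signals.2.2.1) (pvDiffWitness_convolve_signals.2.2.2) ∧ D_convolve_signals (pvDiffWitness_convolve_signals.1) (pvDiffWitness_convolve_signals.2.1) (pvDiffWitness_convolve_signals.2.2.1) (pvDiffWitness_convolve_signals.2.2.2) ∧ convolve_signals (pvDiffWitness_convolve_signals.1) (pvDiffWitness_convolve_signals.2.1) (pvDiffWitness_convolve_signals.2.2.1) (pvDiffWitness_convolve_signals.2.2.2) = pvDiffWitnessOut_convolve_signals.1 ∧ convolve_signals_alt (pvDiffWitness_convolve_signals.1) (pvDiffWitness_convolve_signals.2.1) (pvDiffWitness_convolve_signals.2.2.1) (pvDiffWitness_convolve_signals.2.2.2) = pvDiffWitnessOut_convolve_signals.2 ∧ pvDiffWitnessOut_convolve_signals.1 ≠ pvDiffWitnessOut_convolve_signals.2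
def Claim_exact_convolve_signals : Prop := ∀ (indexes_1 : List Int) (signal_1 : List Int) (indexes_2 : List Int) (signal_2 : List Int), Dom_convolve_signals indexes_1 signal_1 indexes_2 signal_2 → D_convolve_signals indexes_1 signal_1 indexes_2 signal_2 → convolve_signals indexes_1 signal_1 indexes_2 signal_2 ≠ convolve_signals_alt indexes_1 signal_1 indexes_2 signal_2

-- ===== LEMMAS AND PROOFS =====
theorem pvRangeSplit3 (a b c n : Nat) (h : n = a + b + c) :
    List.range n = List.range' 0 a ++ List.range' a b ++ List.range' (a+b) c := by
  subst h
  rw [List.range_eq_range']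
  rw [show a + b + c = a + (b + c) by omega]
  rw [← List.range'_append (step := 1)]
  rw [← List.range'_append (step := 1)]
  simp

theorem pvGetD_set_self (l : List Int) (n : Nat) (a : Int) (h : n < l.length) :
    (l.set n a).getD n 0 = a := by
  simp [List.getD_eq_getElem?_getD, h]

theorem pvGetD_set_ne (l : List Int) (n m : Nat) (a : Int) (h : m ≠ n) :
    (l.set n a).getD m 0 = l.getD m 0 := by
  simp [List.getD_eq_getElem?_getD, List.getElem?_set_ne h.symm]

theorem pvGetD_oob (l : List Int) (m : Nat) (h : l.length ≤ m) : l.getD m 0 = 0 := by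
  simp [List.getD_eq_getElem?_getD, List.getElem?_eq_none h]

-- A's inner loop: repeated in-place accumulation at one slot n is one set of the total sum
theorem pvInnerGather (s1 s2 : List Int) (n : Nat) (ks : List Nat) (out : List Int)
    (hn : n < out.length) :
    ks.foldl (fun o k => o.set n (o.getD n 0 + s1.getD k 0 * s2.getD (n - k) 0)) out
      = out.set n (out.getD n 0 + (ks.map (fun k => s1.getD k 0 * s2.getD (n - k) 0)).sum) := by
  induction ks generalizing out with
  | nil =>
      simp only [List.foldl_nil, List.map_nil, List.sum_nil, add_zero]
      rw [List.getD_eq_getElem _ _ hn, List.set_getElem_self]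
  | cons k ks ih =>
      simp only [List.foldl_cons, List.map_cons, List.sum_cons]
      rw [ih _ (by simpa using hn), List.set_set, pvGetD_set_self _ _ _ hn, add_assoc]

-- the value A's gather computes at slot n
def pvGatherEntry (s1 s2 : List Int) (n : Nat) : Int :=
  ((List.range' (n + 1 - s2.length) (min s1.length (n + 1) - (n + 1 - s2.length))).map
    (fun k => s1.getD k 0 * s2.getD (n - k) 0)).sum

-- A's outer loop over range j
theorem pvGatherFold (s1 s2 : List Int) (j : Nat) (out : List Int) (hj : j ≤ out.length) :
    ((List.range j).foldl (fun out n =>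
        (List.range' (n + 1 - s2.length) (min s1.length (n + 1) - (n + 1 - s2.length))).foldl
          (fun o k => o.set n (o.getD n 0 + s1.getD k 0 * s2.getD (n - k) 0)) out) out).length
        = out.length
    ∧ ∀ m, ((List.range j).foldl (fun out n =>
        (List.range' (n + 1 - s2.length) (min s1.length (n + 1) - (n + 1 - s2.length))).foldl
          (fun o k => o.set n (o.getD n 0 + s1.getD k 0 * s2.getD (n - k) 0)) out) out).getD m 0
        = if m < j then out.getD m 0 + pvGatherEntry s1 s2 m else out.getD m 0 := by
  induction j with
  | zero => simp
  | succ j ih =>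
      obtain ⟨ihl, ihe⟩ := ih (Nat.le_of_succ_le hj)
      rw [List.range_succ]
      simp only [List.foldl_append, List.foldl_cons, List.foldl_nil]
      rw [pvInnerGather _ _ _ _ _ (by rw [ihl]; omega)]
      constructor
      · simpa using ihl
      · intro m
        by_cases hm : m = j
        · subst hm
          rw [pvGetD_set_self _ _ _ (by rw [ihl]; omega), ihe m]
          simp [pvGatherEntry]
        · rw [pvGetD_set_ne _ _ _ _ hm, ihe m]
          by_cases h1 : m < j <;> by_cases h2 : m < j + 1 <;> simp_all <;> omega

-- the full-range entry sum both proofs meet at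
def pvE (p q : List Int) (m : Nat) : Int :=
  ((List.range p.length).map
    (fun k => if k ≤ m ∧ m - k < q.length then p.getD k 0 * q.getD (m - k) 0 else 0)).sum

theorem pvEntryEq (s1 s2 : List Int) (m : Nat) (hm : m < s1.length + s2.length - 1) :
    pvE s1 s2 m = pvGatherEntry s1 s2 m := by
  have hsplit : List.range s1.length
      = List.range' 0 (m + 1 - s2.length)
        ++ List.range' (m + 1 - s2.length) (min s1.length (m + 1) - (m + 1 - s2.length))
        ++ List.range' (min s1.length (m + 1)) (s1.length - min s1.length (m + 1)) := by
    have h2 : min s1.length (m + 1) = (m + 1 - s2.length) + (min s1.length (m + 1) - (m + 1 - s2.length)) := by omega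
    rw [pvRangeSplit3 (m + 1 - s2.length) (min s1.length (m + 1) - (m + 1 - s2.length)) (s1.length - min s1.length (m + 1)) s1.length (by omega)]
    rw [← h2]
  unfold pvE
  rw [hsplit]
  simp only [List.map_append, List.sum_append]
  have h1 : (List.range' 0 (m + 1 - s2.length)).map
      (fun i => if i ≤ m ∧ m - i < s2.length then s1.getD i 0 * s2.getD (m - i) 0 else 0)
      = (List.range' 0 (m + 1 - s2.length)).map (fun _ => (0 : Int)) := by
    apply List.map_congr_left
    intro i hi
    rw [List.mem_range'] at hi
    rw [if_neg (by omega)]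
  have h3 : (List.range' (min s1.length (m + 1)) (s1.length - min s1.length (m + 1))).map
      (fun i => if i ≤ m ∧ m - i < s2.length then s1.getD i 0 * s2.getD (m - i) 0 else 0)
      = (List.range' (min s1.length (m + 1)) (s1.length - min s1.length (m + 1))).map (fun _ => (0 : Int)) := by
    apply List.map_congr_left
    intro i hi
    rw [List.mem_range'] at hi
    rw [if_neg (by omega)]
  have h2 : (List.range' (m + 1 - s2.length) (min s1.length (m + 1) - (m + 1 - s2.length))).map
      (fun i => if i ≤ m ∧ m - i < s2.length then s1.getD i 0 * s2.getD (m - i) 0 else 0)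
      = (List.range' (m + 1 - s2.length) (min s1.length (m + 1) - (m + 1 - s2.length))).map
        (fun k => s1.getD k 0 * s2.getD (m - k) 0) := by
    apply List.map_congr_left
    intro i hi
    rw [List.mem_range'] at hi
    rw [if_pos (by omega)]
  rw [h1, h2, h3]
  simp [pvGatherEntry]

-- convAdd: length and entrywise characterisation
theorem pvGetD_range_map (f : Nat → Int) (n m : Nat) :
    (((List.range n).map f).getD m 0) = if m < n then f m else 0 := by
  by_cases h : m < n
  · rw [List.getD_eq_getElem _ _ (by simpa using h)]
    simp [h]
  · rw [pvGetD_oob _ _ (by simpa using Nat.le_of_not_lt h)]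
    simp [h]

theorem pvAddLen (x y : List Int) : (convAdd x y).length = max x.length y.length := by
  unfold convAdd
  split <;> simp <;> omega

theorem pvAddGetD (x y : List Int) (m : Nat) :
    (convAdd x y).getD m 0 = x.getD m 0 + y.getD m 0 := by
  unfold convAdd
  split <;> rename_i h <;> rw [pvGetD_range_map]
  · by_cases h1 : m < y.length
    · rw [if_pos h1]
      by_cases h2 : m < x.length
      · rw [if_pos h2]; ring
      · rw [if_neg h2, pvGetD_oob x m (by omega)]; ring
    · rw [if_neg h1, pvGetD_oob x m (by omega), pvGetD_oob y m (by omega)]; ring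
  · by_cases h1 : m < x.length
    · rw [if_pos h1]
      by_cases h2 : m < y.length
      · rw [if_pos h2]
      · rw [if_neg h2, pvGetD_oob y m (by omega)]
    · rw [if_neg h1, pvGetD_oob x m (by omega), pvGetD_oob y m (by omega)]; ring

theorem pvMapMul_getD (a : Int) (q : List Int) (m : Nat) :
    (q.map (fun v => a * v)).getD m 0 = if m < q.length then a * q.getD m 0 else 0 := by
  by_cases h : m < q.length
  · rw [List.getD_eq_getElem _ _ (by simpa using h), List.getD_eq_getElem _ _ h]
    simp [h]
  · rw [pvGetD_oob _ _ (by simpa using Nat.le_of_not_lt h)]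
    simp [h]

-- B's fold, written as a function of the not-yet-processed prefix
def pvH (s2 p : List Int) : List Int :=
  p.reverse.foldl (fun r a => convAdd (s2.map (fun v => a * v)) (0 :: r)) []

theorem pvH_cons (s2 p : List Int) (a : Int) :
    pvH s2 (a :: p) = convAdd (s2.map (fun v => a * v)) (0 :: pvH s2 p) := by
  simp [pvH, List.foldl_append]

theorem pvH_len (s2 p : List Int) (h2 : s2 ≠ []) (hp : p ≠ []) :
    (pvH s2 p).length = p.length + s2.length - 1 := by
  have hq : 1 ≤ s2.length := List.length_pos_iff.mpr h2
  induction p with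
  | nil => exact absurd rfl hp
  | cons a p ih =>
      rw [pvH_cons, pvAddLen]
      by_cases hp' : p = []
      · subst hp'; simp [pvH]; omega
      · simp only [List.length_cons, List.length_map]
        rw [ih hp']
        have : 1 ≤ p.length := List.length_pos_iff.mpr hp'
        omega

theorem pvE_cons_zero (a : Int) (p q : List Int) :
    pvE (a :: p) q 0 = (if 0 < q.length then a * q.getD 0 0 else 0) := by
  unfold pvE
  rw [List.length_cons, List.range_succ_eq_map, List.map_cons, List.map_map, List.sum_cons]
  have hz : List.map ((fun k => if k ≤ 0 ∧ 0 - k < q.length then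
      (a :: p).getD k 0 * q.getD (0 - k) 0 else 0) ∘ Nat.succ) (List.range p.length)
      = List.map (fun _ => (0 : Int)) (List.range p.length) := by
    apply List.map_congr_left
    intro k _
    simp only [Function.comp_apply]
    rw [if_neg (by omega)]
  rw [hz]
  simp

theorem pvE_cons_succ (a : Int) (p q : List Int) (m' : Nat) :
    pvE (a :: p) q (m' + 1)
      = (if m' + 1 < q.length then a * q.getD (m' + 1) 0 else 0) + pvE p q m' := by
  unfold pvE
  rw [List.length_cons, List.range_succ_eq_map, List.map_cons, List.map_map, List.sum_cons]
  congr 1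
  · simp
  · apply congrArg
    apply List.map_congr_left
    intro k _
    simp only [Function.comp_apply, List.getD_cons_succ]
    by_cases hk : k + 1 ≤ m' + 1 ∧ m' + 1 - (k + 1) < q.length
    · rw [if_pos hk, if_pos (by omega : k ≤ m' ∧ m' - k < q.length),
        show m' + 1 - (k + 1) = m' - k from by omega]
    · rw [if_neg hk, if_neg (by omega : ¬ (k ≤ m' ∧ m' - k < q.length))]

theorem pvH_getD (s2 p : List Int) (m : Nat) : (pvH s2 p).getD m 0 = pvE p s2 m := by
  induction p generalizing m with
  | nil => simp [pvH, pvE]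
  | cons a p ih =>
      rw [pvH_cons, pvAddGetD, pvMapMul_getD]
      cases m with
      | zero => rw [pvE_cons_zero]; simp
      | succ m' => rw [pvE_cons_succ, List.getD_cons_succ, ih]

-- main equality of the two signal computations, both signals nonempty
theorem pvConvEq (s1 s2 : List Int) (h1 : s1 ≠ []) (h2 : s2 ≠ []) :
    ((List.range (s1.length + s2.length - 1)).foldl (fun out n =>
        (List.range' (n + 1 - s2.length) (min s1.length (n + 1) - (n + 1 - s2.length))).foldl
          (fun out k => out.set n (out.getD n 0 + s1.getD k 0 * s2.getD (n - k) 0)) out)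
        (List.replicate (s1.length + s2.length - 1) 0))
    = pvH s2 s1 := by
  obtain ⟨gl, ge⟩ := pvGatherFold s1 s2 (s1.length + s2.length - 1)
    (List.replicate (s1.length + s2.length - 1) 0) (by simp)
  apply List.ext_getElem
  · rw [gl, pvH_len s2 s1 h2 h1]; simp
  · intro m hA hB
    have hm : m < s1.length + s2.length - 1 := by rw [gl] at hA; simpa using hA
    rw [← List.getD_eq_getElem _ 0 hA, ← List.getD_eq_getElem _ 0 hB]
    rw [ge m, pvH_getD, pvEntryEq s1 s2 m hm, if_pos hm]
    simp

-- the fold of A acts as the identity when one signal is empty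
-- ===== VERDICT (by name: the statement is the Claim_ definition above) =====
theorem convolve_signals_spec : Claim_unchanged_convolve_signals := by
  intro i1 s1 i2 s2 _ hD
  show convolve_signals i1 s1 i2 s2 = convolve_signals_alt i1 s1 i2 s2
  by_cases h1 : s1 = []
  · have h2 : s2.length < 2 := by
      by_contra h
      exact hD (Or.inl ⟨h1, by omega⟩)
    subst h1
    match s2, h2 with
    | [], _ => simp [convolve_signals, convolve_signals_alt]
    | [x], _ => simp [convolve_signals, convolve_signals_alt]
  · by_cases h2 : s2 = []
    · have hl1 : s1.length < 2 := by
        by_contra h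
        exact hD (Or.inr ⟨h2, by omega⟩)
      subst h2
      match s1, h1, hl1 with
      | [x], _, _ => simp [convolve_signals, convolve_signals_alt]
    · simp only [convolve_signals, convolve_signals_alt]
      refine Prod.ext rfl ?_
      show _ = if s1 ≠ [] ∧ s2 ≠ [] then _ else _
      rw [if_pos ⟨h1, h2⟩]
      exact pvConvEq s1 s2 h1 h2

theorem convolve_signals_changed : Claim_changed_convolve_signals := by
  unfold Claim_changed_convolve_signals; decide

theorem convolve_signals_tight : Claim_exact_convolve_signals := by
  intro i1 s1 i2 s2 _ hD heq
  have hlen := congrArg (fun p => p.2.length) heq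
  simp only [convolve_signals, convolve_signals_alt] at hlen
  obtain ⟨gl, _⟩ := pvGatherFold s1 s2 (s1.length + s2.length - 1)
    (List.replicate (s1.length + s2.length - 1) 0) (by simp)
  have hone : ¬ (s1 ≠ [] ∧ s2 ≠ []) := by
    rcases hD with ⟨h, _⟩ | ⟨h, _⟩ <;> simp [h]
  rw [if_neg hone] at hlen
  simp only [gl, List.length_replicate, List.length_nil] at hlen
  rcases hD with ⟨h, hl⟩ | ⟨h, hl⟩ <;> subst h <;> simp at hlen <;> omega
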